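-- pv_equiv track=rewrite | github.com/sarowlwp/study-class | scripts/raz_sync_processor/text_aligner.py | _find_word_sequence
-- ===== SOURCE A (Python) =====
-- from typing import List, Tuple, Optional
--
-- def _find_word_sequence(
--
--     page_words: List[str],
--     words: List[str],
--     start_pos: int
-- ) -> Optional[int]:
--     """在单词列表中查找页面单词序列的起始位置.
--
--     Args:
--         page_words: 页面的单词列表
--         words: 完整的转录单词列表
--         start_pos: 开始搜索的单词索引
--
--     Returns:
--         匹配的起始单词索引，未找到返回 None
--     """
--     if not page_words or not words:
--         return None
--
--     # 从 start_pos 开始搜索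
--     search_start = max(0, start_pos - 2)
--
--     for i in range(search_start, len(words)):
--         # 检查从位置 i 开始的单词序列是否匹配
--         match = True
--         for j, pw in enumerate(page_words):
--             if i + j >= len(words):
--                 match = False
--                 break
--             if words[i + j] != pw:
--                 match = False
--                 break
--
--         if match:
--             return i
--
--     # 尝试只匹配第一个单词
--     if page_words:
--         first_word = page_words[0]
--         for i in range(search_start, len(words)):
--             if words[i] == first_word:
--                 return i
--
--     return None
-- ===== SOURCE B (Python) =====
-- from typing import List, Optional
--
-- def _find_word_sequence(
--     page_words: List[str],
--     words: List[str],
--     start_pos: int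
-- ) -> Optional[int]:
--     """Single pass: only positions whose word equals page_words[0] are candidates;
--     a full match returns immediately, the first candidate is remembered as fallback."""
--     if not page_words or not words:
--         return None
--     first = page_words[0]
--     m = len(page_words)
--     fallback = None
--     for i in range(max(0, start_pos - 2), len(words)):
--         if words[i] == first:
--             if words[i:i + m] == page_words:
--                 return i
--             if fallback is None:
--                 fallback = i
--     return fallback
-- ===== Notes on version B (the rewrite author's own statement) =====
-- stated objective: alternative
-- what changed: Replaces A's two separate scans (a full-match scan with an index-by-index inner loop, then a fallback first-word scan) by one single pass that filters candidate positions by the first word, compares with one slice, and records the fallback on the fly.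
import Mathlib
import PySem

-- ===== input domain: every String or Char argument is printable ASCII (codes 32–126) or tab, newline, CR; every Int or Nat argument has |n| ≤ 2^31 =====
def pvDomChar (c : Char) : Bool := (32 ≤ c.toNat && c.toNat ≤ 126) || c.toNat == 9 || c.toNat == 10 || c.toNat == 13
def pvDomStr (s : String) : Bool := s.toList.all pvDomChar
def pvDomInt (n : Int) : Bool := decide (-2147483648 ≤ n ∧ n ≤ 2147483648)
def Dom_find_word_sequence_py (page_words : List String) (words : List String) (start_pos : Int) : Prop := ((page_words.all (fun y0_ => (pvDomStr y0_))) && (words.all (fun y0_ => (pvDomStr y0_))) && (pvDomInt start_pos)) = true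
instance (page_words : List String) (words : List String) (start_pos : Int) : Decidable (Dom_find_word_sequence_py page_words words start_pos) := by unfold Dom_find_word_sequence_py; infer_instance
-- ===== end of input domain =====

-- B replaces A's two scans (full-match scan, then fallback first-word scan) by one single pass
-- filtering candidates by the first word and recording the fallback on the fly (objective: alternative).


-- ===== PORT A =====
-- inner loop 'for j, pw in enumerate(page_words)': j is the enumeration counter
def pvAMatch (words : List String) (i : Int) (j : Int) : List String → Bool
  | [] => true
  | pw :: rest =>
    if (words.length : Int) ≤ i + j then false
    else
      match PySem.List.pyGet? words (i + j) with   -- in range here, so always `some`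
      | some w => if w ≠ pw then false else pvAMatch words i (j + 1) rest
      | none => false

-- first loop: first full match
def pvALoop1 (words : List String) (page_words : List String) : List Int → Option Int
  | [] => none
  | i :: rest => if pvAMatch words i 0 page_words then some i else pvALoop1 words page_words rest

-- second loop: first occurrence of the first word
def pvALoop2 (words : List String) (first : String) : List Int → Option Int
  | [] => none
  | i :: rest =>
    match PySem.List.pyGet? words i with   -- in range here, so always `some`
    | some w => if w == first then some i else pvALoop2 words first rest
    | none => pvALoop2 words first rest

def find_word_sequence_py (page_words : List String) (words : List String) (start_pos : Int) : Option Int :=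
  if page_words.isEmpty || words.isEmpty then none
  else
    let search_start := max 0 (start_pos - 2)
    let idxs := PySem.List.pyRange search_start (words.length : Int) 1
    match pvALoop1 words page_words idxs with
    | some i => some i
    | none =>
      match page_words with
      | [] => none                       -- 'if page_words:' false → fall through to 'return None'
      | first :: _ => pvALoop2 words first idxs

-- ===== PORT B =====
def pvBLoop (words : List String) (page_words : List String) (first : String) (fallback : Option Int) : List Int → Option Int
  | [] => fallback
  | i :: rest =>
    match PySem.List.pyGet? words i with   -- in range here, so always `some`
    | some w =>
      if w == first then
        if PySem.List.slice words (some i) (some (i + (page_words.length : Int))) == page_words then some i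
        else pvBLoop words page_words first (match fallback with | none => some i | some f => some f) rest
      else pvBLoop words page_words first fallback rest
    | none => pvBLoop words page_words first fallback rest

def find_word_sequence_py_alt (page_words : List String) (words : List String) (start_pos : Int) : Option Int :=
  match page_words with
  | [] => none
  | first :: _ =>
    if words.isEmpty then none
    else pvBLoop words page_words first none (PySem.List.pyRange (max 0 (start_pos - 2)) (words.length : Int) 1)

-- ===== PRECONDITION & SPEC =====
def Spec_find_word_sequence_py (page_words : List String) (words : List String) (start_pos : Int) (out : Option Int) : Prop := out = find_word_sequence_py_alt page_words words start_pos
instance (page_words : List String) (words : List String) (start_pos : Int) (out : Option Int) : Decidable (Spec_find_word_sequence_py page_words words start_pos out) := by unfold Spec_find_word_sequence_py; infer_instance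

-- ===== CLAIM (what is proved, stated in full; the proofs are below) =====
def Claim_equal_find_word_sequence_py : Prop := ∀ (page_words : List String) (words : List String) (start_pos : Int), Dom_find_word_sequence_py page_words words start_pos → Spec_find_word_sequence_py page_words words start_pos (find_word_sequence_py page_words words start_pos)

-- ===== LEMMAS AND PROOFS =====

-- A's inner loop computes a drop/take comparison
theorem pvAMatch_eq (words : List String) (pws : List String) (i j : Int) (hi : 0 ≤ i) (hj : 0 ≤ j) :
    pvAMatch words i j pws = ((words.drop (i + j).toNat).take pws.length == pws) := by
  induction pws generalizing j with
  | nil => simp [pvAMatch]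
  | cons pw rest ih =>
    rw [pvAMatch]
    by_cases h : (words.length : Int) ≤ i + j
    · have hd : words.drop (i + j).toNat = [] := by
        rw [List.drop_eq_nil_iff]; omega
      simp [h, hd]
    · push Not at h
      have h0 : 0 ≤ i + j := by omega
      have hlt : (i + j).toNat < words.length := by omega
      rw [if_neg (by omega), PySem.List.pyGet?_eq_some_getElem words h0 (by exact_mod_cast h)]
      have hd : words.drop (i + j).toNat = words[(i + j).toNat] :: words.drop ((i + j).toNat + 1) :=
        (List.getElem_cons_drop hlt).symm
      have hj1 : (i + (j + 1)).toNat = (i + j).toNat + 1 := by omega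
      rw [hd, List.length_cons, List.take_succ_cons, List.cons_beq_cons]
      by_cases he : words[(i + j).toNat] = pw
      · simp [he, ih (j + 1) (by omega), hj1]
      · simp [he]

-- B's slice test is the same drop/take comparison
theorem pvSlice_eq (words pws : List String) (i : Int) (hi : 0 ≤ i) :
    (PySem.List.slice words (some i) (some (i + (pws.length : Int))) == pws)
      = ((words.drop i.toNat).take pws.length == pws) := by
  rw [PySem.List.slice_toNat words hi (by omega)]
  have h : (i + (pws.length : Int)).toNat - i.toNat = pws.length := by omega
  rw [h]

-- the single pass equals (first full match) orElse fallback orElse (first first-word match)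
theorem pvLoops (words : List String) (first : String) (pr : List String) :
    ∀ (L : List Int) (fallback : Option Int),
      (∀ i ∈ L, 0 ≤ i ∧ i < (words.length : Int)) →
      pvBLoop words (first :: pr) first fallback L =
        match pvALoop1 words (first :: pr) L with
        | some i => some i
        | none =>
          match fallback with
          | some f => some f
          | none => pvALoop2 words first L := by
  intro L
  induction L with
  | nil =>
    intro fallback _
    cases fallback <;> simp [pvBLoop, pvALoop1, pvALoop2]
  | cons i rest ih =>
    intro fallback hb
    have hi : 0 ≤ i ∧ i < (words.length : Int) := hb i (List.mem_cons_self)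
    have hrest : ∀ k ∈ rest, 0 ≤ k ∧ k < (words.length : Int) := fun k hk => hb k (List.mem_cons_of_mem _ hk)
    have hlt : i.toNat < words.length := by omega
    have hget : PySem.List.pyGet? words i = some words[i.toNat] :=
      PySem.List.pyGet?_eq_some_getElem words hi.1 hi.2
    have hfm : pvAMatch words i 0 (first :: pr)
        = ((words.drop i.toNat).take (first :: pr).length == (first :: pr)) := by
      have := pvAMatch_eq words (first :: pr) i 0 hi.1 le_rfl
      simpa using this
    have hsl := pvSlice_eq words (first :: pr) i hi.1
    simp only [pvBLoop, pvALoop1, pvALoop2, hget]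
    by_cases hw : words[i.toNat] = first
    · -- candidate position: full-match test decides both sides
      have hwb : (words[i.toNat] == first) = true := by simp [hw]
      rw [hwb, hsl, hfm]
      by_cases hfull : ((words.drop i.toNat).take (first :: pr).length == (first :: pr)) = true
      · rw [hfull]; rfl
      · have hf' : ((words.drop i.toNat).take (first :: pr).length == (first :: pr)) = false := by
          simpa using hfull
        rw [hf']
        simp only [Bool.false_eq_true, if_false, if_true]
        rw [ih _ hrest]
        cases fallback <;> rfl
    · -- not a candidate: no full match possible at i, both sides skip
      have hwb : (words[i.toNat] == first) = false := by simp [hw]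
      have hfm' : pvAMatch words i 0 (first :: pr) = false := by
        have hd : words.drop i.toNat = words[i.toNat] :: words.drop (i.toNat + 1) :=
          (List.getElem_cons_drop hlt).symm
        rw [hfm, hd, List.length_cons, List.take_succ_cons, List.cons_beq_cons, hwb]
        exact Bool.false_and _
      rw [hwb, hfm']
      simp only [Bool.false_eq_true, if_false]
      exact ih fallback hrest

-- ===== VERDICT (by name: the statement is the Claim_ definition above) =====
theorem find_word_sequence_py_spec : Claim_equal_find_word_sequence_py := by
  intro page_words words start_pos _
  unfold Spec_find_word_sequence_py find_word_sequence_py find_word_sequence_py_alt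
  match page_words with
  | [] => simp
  | first :: pr =>
    by_cases hw : words.isEmpty
    · simp [hw]
    · simp only [List.isEmpty_cons, hw, Bool.false_or]
      have hb : ∀ i ∈ PySem.List.pyRange (max 0 (start_pos - 2)) (words.length : Int) 1,
          0 ≤ i ∧ i < (words.length : Int) := by
        intro i hi
        rw [PySem.List.mem_pyRange_one] at hi
        constructor
        · exact le_trans (le_max_left 0 (start_pos - 2)) hi.1
        · exact hi.2
      rw [pvLoops words first pr _ none hb]
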